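-- pv_equiv track=rewrite | github.com/pypi-data/pypi-mirror-385 | packages/mirrorit/mirrorit-1.0.2-py3-none-any.whl/mirrorit/cli.py | mirror_word_by_word
-- ===== SOURCE A (Python) =====
-- def mirror_word_by_word(text: str) -> str:
--     words = text.split(" ")
--     mirrored = []
--     for word in words:
--         letters = [c for c in word if c.isalnum()]
--         reversed_letters = letters[::-1]
--         ri = 0
--         result = ""
--         for ch in word:
--             if ch.isalnum():
--                 result += reversed_letters[ri]
--                 ri += 1
--             else:
--                 result += ch
--         mirrored.append(result)
--     return " ".join(mirrored)
-- ===== SOURCE B (Python) =====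
-- def mirror_word_by_word(text: str) -> str:
--     mirrored = []
--     for word in text.split(" "):
--         chars = list(word)
--         i, j = 0, len(chars) - 1
--         while i < j:
--             if not chars[i].isalnum():
--                 i += 1
--             elif not chars[j].isalnum():
--                 j -= 1
--             else:
--                 chars[i], chars[j] = chars[j], chars[i]
--                 i += 1
--                 j -= 1
--         mirrored.append("".join(chars))
--     return " ".join(mirrored)
-- ===== Notes on version B (the rewrite author's own statement) =====
-- stated objective: alternative
-- what changed: Replaces A's two passes per word (collect the alphanumeric chars, reverse them, then refill the word left-to-right from that list) with an in-place two-pointer loop that converges from both ends, skipping non-alphanumeric chars and swapping the alphanumeric end pair, so no reversed-letters list or refill index is built.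
import Mathlib
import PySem

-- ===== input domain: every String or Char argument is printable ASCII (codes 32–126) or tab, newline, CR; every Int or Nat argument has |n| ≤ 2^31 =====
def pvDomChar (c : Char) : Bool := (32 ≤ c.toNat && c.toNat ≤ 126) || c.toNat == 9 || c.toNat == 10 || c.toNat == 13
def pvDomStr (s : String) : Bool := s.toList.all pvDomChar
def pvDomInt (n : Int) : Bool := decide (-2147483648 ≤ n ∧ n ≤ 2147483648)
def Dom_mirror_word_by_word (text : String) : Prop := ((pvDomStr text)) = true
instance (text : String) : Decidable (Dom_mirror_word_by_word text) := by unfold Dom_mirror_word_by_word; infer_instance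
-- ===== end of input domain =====

-- B reverses the alnum chars of each word in place with two pointers converging from both
-- ends, instead of A's two passes (collect+reverse the letters, then refill); alternative, same cost.

-- ===== PORT A =====
-- A's inner 'for ch in word' loop: state (ri, result)
def pvStepA (reversed_letters : List Char) (st : Int × List Char) (ch : Char) : Int × List Char :=
  if PySem.Chars.isalnum ch then
    (st.1 + 1, st.2 ++ [PySem.List.pyGetD reversed_letters st.1 ch])
  else
    (st.1, st.2 ++ [ch])

def mirror_word_by_word (text : String) : String :=
  let words := PySem.Chars.splitOn text.toList (" ".toList)
  let mirrored := words.foldl (fun acc word =>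
    let letters := word.filter (fun c => PySem.Chars.isalnum c)
    let reversed_letters := (PySem.List.slice? letters none none (-1)).getD []
    let fin := word.foldl (pvStepA reversed_letters) (0, ([] : List Char))
    acc ++ [fin.2]) []
  String.ofList (PySem.Chars.join (" ".toList) mirrored)

-- ===== PORT B =====
-- Source B's while loop: two pointers i, j converge; swap when both ends are alnum
def pvTwoPtr (chars : List Char) (i j : Int) : List Char :=
  if _h : i < j then
    if !(PySem.Chars.isalnum (PySem.List.pyGetD chars i ' ')) then
      pvTwoPtr chars (i + 1) j
    else if !(PySem.Chars.isalnum (PySem.List.pyGetD chars j ' ')) then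
      pvTwoPtr chars i (j - 1)
    else
      pvTwoPtr
        (PySem.List.pySetD (PySem.List.pySetD chars i (PySem.List.pyGetD chars j ' '))
          j (PySem.List.pyGetD chars i ' '))
        (i + 1) (j - 1)
  else chars
termination_by (j - i).toNat
decreasing_by all_goals omega

def mirror_word_by_word_alt (text : String) : String :=
  String.ofList (PySem.Chars.join (" ".toList)
    ((PySem.Chars.splitOn text.toList (" ".toList)).map
      (fun word => pvTwoPtr word 0 (PySem.List.len word - 1))))

-- ===== PRECONDITION & SPEC =====
def Spec_mirror_word_by_word (text : String) (out : String) : Prop := out = mirror_word_by_word_alt text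
instance (text : String) (out : String) : Decidable (Spec_mirror_word_by_word text out) := by unfold Spec_mirror_word_by_word; infer_instance

-- ===== CLAIM (what is proved, stated in full; the proofs are below) =====
def Claim_equal_mirror_word_by_word : Prop := ∀ (text : String), Dom_mirror_word_by_word text → Spec_mirror_word_by_word text (mirror_word_by_word text)

-- ===== LEMMAS AND PROOFS =====

-- proof-side characterisation of A's refill pass: consume the supply list rl at alnum positions
def pvFill : List Char → List Char → List Char
  | [], _ => []
  | c :: cs, rl =>
    if PySem.Chars.isalnum c then rl.headD c :: pvFill cs rl.tail
    else c :: pvFill cs rl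

lemma pvFill_append (xs ys rl : List Char) :
    pvFill (xs ++ ys) rl
      = pvFill xs rl ++ pvFill ys (rl.drop (xs.countP (fun c => PySem.Chars.isalnum c))) := by
  induction xs generalizing rl with
  | nil => simp [pvFill]
  | cons c cs ih =>
    by_cases h : PySem.Chars.isalnum c
    · simp [pvFill, h, ih]
    · simp [pvFill, h, ih]

lemma pvFill_append_supply (xs rl extra : List Char)
    (h : xs.countP (fun c => PySem.Chars.isalnum c) ≤ rl.length) :
    pvFill xs (rl ++ extra) = pvFill xs rl := by
  induction xs generalizing rl with
  | nil => simp [pvFill]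
  | cons c cs ih =>
    by_cases hc : PySem.Chars.isalnum c
    · have h' : cs.countP (fun c => PySem.Chars.isalnum c) + 1 ≤ rl.length := by
        simpa [List.countP_cons, hc] using h
      cases rl with
      | nil => simp at h'
      | cons a as =>
        simp only [pvFill, hc, if_pos, List.cons_append, List.headD_cons, List.tail_cons]
        rw [ih as (by simpa using Nat.lt_succ_iff.mp (Nat.lt_of_lt_of_le (Nat.lt_succ_of_le (Nat.le_refl _)) h'))]
    · simp only [pvFill, hc, Bool.false_eq_true, if_false]
      rw [ih rl (by simpa [List.countP_cons, hc] using h)]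

-- proof-side bridge: structural converge-from-both-ends recursion; both ports are proved equal to it
def pvMirrorRec : List Char → List Char
  | [] => []
  | [c] => [c]
  | c :: r :: rs =>
    if !PySem.Chars.isalnum c then
      c :: pvMirrorRec (r :: rs)
    else if !PySem.Chars.isalnum ((r :: rs).getLast (by simp)) then
      pvMirrorRec (c :: (r :: rs).dropLast) ++ [(r :: rs).getLast (by simp)]
    else
      (r :: rs).getLast (by simp) :: (pvMirrorRec ((r :: rs).dropLast) ++ [c])
termination_by cs => cs.length
decreasing_by all_goals simp [List.length_dropLast]

-- the bridge recursion computes exactly A's fill of the reversed letter list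
lemma pvMirrorRec_eq_fill (cs : List Char) :
    pvMirrorRec cs = pvFill cs ((cs.filter (fun c => PySem.Chars.isalnum c)).reverse) := by
  fun_induction pvMirrorRec cs with
  | case1 => simp [pvFill]
  | case2 c => by_cases hc : PySem.Chars.isalnum c <;> simp [pvFill, hc]
  | case3 c r rs hc ih =>
    replace hc : ¬ PySem.Chars.isalnum c = true := by simpa using hc
    simp [pvFill, hc, ih]
  | case4 c r rs hc hd ih =>
    replace hc : PySem.Chars.isalnum c = true := by simpa using hc
    have hd' : PySem.Chars.isalnum ((r :: rs).getLast (by simp)) = false := by simpa using hd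
    have hsplit : (r :: rs).dropLast ++ [(r :: rs).getLast (by simp)] = r :: rs :=
      List.dropLast_concat_getLast (by simp)
    set d := (r :: rs).getLast (by simp) with hdd
    set mid := (r :: rs).dropLast with hmm
    have h1 : c :: r :: rs = (c :: mid) ++ [d] := by rw [← hsplit]; simp
    rw [h1]
    have h2 : List.filter (fun c => PySem.Chars.isalnum c) ((c :: mid) ++ [d])
        = List.filter (fun c => PySem.Chars.isalnum c) (c :: mid) := by
      rw [List.filter_append]; simp [hd']
    rw [h2, pvFill_append, ih]
    simp [pvFill, hd']
  | case5 c r rs hc hd ih =>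
    replace hc : PySem.Chars.isalnum c = true := by simpa using hc
    have hd' : PySem.Chars.isalnum ((r :: rs).getLast (by simp)) = true := by simpa using hd
    have hsplit : (r :: rs).dropLast ++ [(r :: rs).getLast (by simp)] = r :: rs :=
      List.dropLast_concat_getLast (by simp)
    set d := (r :: rs).getLast (by simp) with hdd
    set mid := (r :: rs).dropLast with hmm
    have h1 : c :: r :: rs = (c :: mid) ++ [d] := by rw [← hsplit]; simp
    rw [h1]
    have hfm : List.filter (fun c => PySem.Chars.isalnum c) ((c :: mid) ++ [d])
        = (c :: List.filter (fun c => PySem.Chars.isalnum c) mid) ++ [d] := by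
      rw [List.filter_append]; simp [hc, hd']
    rw [hfm]
    have hrev : ((c :: List.filter (fun c => PySem.Chars.isalnum c) mid) ++ [d]).reverse
        = d :: ((List.filter (fun c => PySem.Chars.isalnum c) mid).reverse ++ [c]) := by simp
    rw [hrev]
    have hcons : pvFill ((c :: mid) ++ [d]) (d :: ((List.filter (fun c => PySem.Chars.isalnum c) mid).reverse ++ [c]))
        = d :: pvFill (mid ++ [d]) ((List.filter (fun c => PySem.Chars.isalnum c) mid).reverse ++ [c]) := by
      rw [List.cons_append]
      simp only [pvFill, hc, if_pos, List.headD_cons, List.tail_cons]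
    have hk : mid.countP (fun c => PySem.Chars.isalnum c)
        = ((List.filter (fun c => PySem.Chars.isalnum c) mid).reverse).length := by
      simp [List.countP_eq_length_filter]
    rw [hcons, pvFill_append, hk, List.drop_left,
      pvFill_append_supply mid ((List.filter (fun c => PySem.Chars.isalnum c) mid).reverse) [c] (le_of_eq hk),
      ih]
    simp [pvFill, hd']

-- A's inner fold, with invariant: index ri into the supply list rl
lemma pvFoldA (rl : List Char) (cs : List Char) (ri : ℕ) (acc : List Char)
    (h : ri + cs.countP (fun c => PySem.Chars.isalnum c) ≤ rl.length) :
    cs.foldl (pvStepA rl) ((ri : Int), acc)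
      = (((ri + cs.countP (fun c => PySem.Chars.isalnum c) : ℕ) : Int), acc ++ pvFill cs (rl.drop ri)) := by
  induction cs generalizing ri acc with
  | nil => simp [pvFill]
  | cons c cs ih =>
    by_cases hc : PySem.Chars.isalnum c
    · have hlt : ri < rl.length := by
        have := h; simp [hc] at this; omega
      have hstep : pvStepA rl ((ri : Int), acc) c = (((ri : Int) + 1), acc ++ [rl[ri]]) := by
        simp [pvStepA, hc, PySem.List.pyGetD_natCast, List.getElem?_eq_getElem hlt]
      have hcast : ((ri : Int) + 1) = (((ri + 1 : ℕ) : Int)) := by push_cast; ring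
      rw [List.foldl_cons, hstep, hcast,
        ih (ri + 1) (acc ++ [rl[ri]]) (by simp [hc] at h ⊢; omega)]
      simp [pvFill, hc, List.tail_drop]
      exact ⟨by ring, by simp [List.getElem?_eq_getElem hlt]⟩
    · rw [List.foldl_cons]
      have hstep : pvStepA rl ((ri : Int), acc) c = ((ri : Int), acc ++ [c]) := by
        simp [pvStepA, hc]
      rw [hstep, ih ri (acc ++ [c]) (by simp [hc] at h ⊢; omega)]
      simp [pvFill, hc]

-- per-word: A's two passes equal B's recursion
lemma pvWord_eq (word : List Char) :
    (word.foldl (pvStepA ((word.filter (fun c => PySem.Chars.isalnum c)).reverse)) (0, ([] : List Char))).2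
      = pvMirrorRec word := by
  have h0 := pvFoldA ((word.filter (fun c => PySem.Chars.isalnum c)).reverse) word 0 []
    (by simp [List.countP_eq_length_filter])
  norm_num at h0
  rw [h0]
  simp [pvMirrorRec_eq_fill]

-- reading / writing the cell just after prefix l
lemma pvGetAt (l t : List Char) (y d : Char) :
    PySem.List.pyGetD (l ++ y :: t) ((l.length : Int)) d = y := by
  simp [PySem.List.pyGetD_natCast, List.getD_eq_getElem?_getD]

lemma pvSetAt (l t : List Char) (y v : Char) :
    PySem.List.pySetD (l ++ y :: t) ((l.length : Int)) v = l ++ v :: t := by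
  simp [PySem.List.pySetD_natCast]

-- B's two-pointer loop on the segment between the pointers is the bridge recursion
lemma pvTwoPtr_seg (m : List Char) : ∀ (l r : List Char),
    pvTwoPtr (l ++ m ++ r) (l.length : Int) ((l.length : Int) + (m.length : Int) - 1)
      = l ++ pvMirrorRec m ++ r := by
  induction m using pvMirrorRec.induct with
  | case1 =>
    intro l r
    rw [pvTwoPtr]
    rw [dif_neg (by simp)]
    simp [pvMirrorRec]
  | case2 c =>
    intro l r
    rw [pvTwoPtr]
    rw [dif_neg (by simp)]
    simp [pvMirrorRec]
  | case3 c r' rs hc ih =>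
    intro l r
    replace hc : PySem.Chars.isalnum c = false := by simpa using hc
    have hch : l ++ (c :: r' :: rs) ++ r = l ++ c :: ((r' :: rs) ++ r) := by simp
    rw [pvTwoPtr, dif_pos (by simp; try omega), hch, pvGetAt, hc]
    have hIdx : (l.length : Int) + 1 = ((l ++ [c]).length : Int) := by simp
    have hch2 : l ++ c :: ((r' :: rs) ++ r) = (l ++ [c]) ++ (r' :: rs) ++ r := by simp
    have hJ : (l.length : Int) + ((c :: r' :: rs).length : Int) - 1
        = ((l ++ [c]).length : Int) + (((r' :: rs)).length : Int) - 1 := by simp; try omega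
    simp only [Bool.not_false, if_true]
    rw [hch2, hIdx, hJ, ih]
    simp [pvMirrorRec, hc]
  | case4 c r' rs hc hd ih =>
    intro l r
    replace hc : PySem.Chars.isalnum c = true := by simpa using hc
    have hd' : PySem.Chars.isalnum ((r' :: rs).getLast (by simp)) = false := by simpa using hd
    have hsplit : (r' :: rs).dropLast ++ [(r' :: rs).getLast (by simp)] = r' :: rs :=
      List.dropLast_concat_getLast (by simp)
    set d := (r' :: rs).getLast (by simp) with hdd
    set mid := (r' :: rs).dropLast with hmm
    have hlen : (r' :: rs).length = mid.length + 1 := by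
      rw [← hsplit]; simp
    have hch : l ++ (c :: r' :: rs) ++ r = l ++ c :: ((r' :: rs) ++ r) := by simp
    rw [pvTwoPtr, dif_pos (by simp; try omega), hch, pvGetAt, hc]
    simp only [Bool.not_true, Bool.false_eq_true, if_false]
    -- read position j = l.length + m.length - 1: it holds d
    have hchJ : l ++ c :: ((r' :: rs) ++ r) = (l ++ c :: mid) ++ d :: r := by
      rw [← hsplit]; simp
    have hJ : (l.length : Int) + ((c :: r' :: rs).length : Int) - 1
        = (((l ++ c :: mid)).length : Int) := by
      simp [hlen]; omega
    rw [hchJ, hJ, pvGetAt, hd']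
    simp only [Bool.not_false, if_true]
    -- recurse with the last char frozen in the suffix
    have hJ' : ((l ++ c :: mid).length : Int) - 1
        = (l.length : Int) + (((c :: mid)).length : Int) - 1 := by simp; try omega
    have hch2 : (l ++ c :: mid) ++ d :: r = l ++ (c :: mid) ++ (d :: r) := by simp
    have hI : ((l ++ c :: mid).length : Int) - 1 + 1 = ((l ++ c :: mid).length : Int) := by omega
    rw [hch2, hJ', ih]
    have : pvMirrorRec (c :: r' :: rs) = pvMirrorRec (c :: mid) ++ [d] := by
      rw [pvMirrorRec]
      simp [hc, ← hdd, ← hmm, hd']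
    rw [this]
    simp
  | case5 c r' rs hc hd ih =>
    intro l r
    replace hc : PySem.Chars.isalnum c = true := by simpa using hc
    have hd' : PySem.Chars.isalnum ((r' :: rs).getLast (by simp)) = true := by simpa using hd
    have hsplit : (r' :: rs).dropLast ++ [(r' :: rs).getLast (by simp)] = r' :: rs :=
      List.dropLast_concat_getLast (by simp)
    set d := (r' :: rs).getLast (by simp) with hdd
    set mid := (r' :: rs).dropLast with hmm
    have hlen : (r' :: rs).length = mid.length + 1 := by
      rw [← hsplit]; simp
    have hch : l ++ (c :: r' :: rs) ++ r = l ++ c :: ((r' :: rs) ++ r) := by simp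
    rw [pvTwoPtr, dif_pos (by simp; try omega), hch, pvGetAt, hc]
    simp only [Bool.not_true, Bool.false_eq_true, if_false]
    have hchJ : l ++ c :: ((r' :: rs) ++ r) = (l ++ c :: mid) ++ d :: r := by
      rw [← hsplit]; simp
    have hJ : (l.length : Int) + ((c :: r' :: rs).length : Int) - 1
        = (((l ++ c :: mid)).length : Int) := by
      simp [hlen]; omega
    rw [hchJ, hJ, pvGetAt, hd']
    simp only [Bool.not_true, Bool.false_eq_true, if_false]
    -- the swap: write d at position l.length, c at position j
    have hsw1 : PySem.List.pySetD ((l ++ c :: mid) ++ d :: r) ((l.length : Int)) d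
        = (l ++ d :: mid) ++ d :: r := by
      have h1 : (l ++ c :: mid) ++ d :: r = l ++ c :: (mid ++ d :: r) := by simp
      have h2 : (l ++ d :: mid) ++ d :: r = l ++ d :: (mid ++ d :: r) := by simp
      rw [h1, h2, pvSetAt]
    rw [hsw1]
    have hsw2 : PySem.List.pySetD ((l ++ d :: mid) ++ d :: r) (((l ++ c :: mid).length : Int)) c
        = (l ++ d :: mid) ++ c :: r := by
      have h3 : ((l ++ c :: mid).length : Int) = ((l ++ d :: mid).length : Int) := by simp
      rw [h3, pvSetAt]
    rw [hsw2]
    -- recurse on the middle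
    have hch2 : (l ++ d :: mid) ++ c :: r = (l ++ [d]) ++ mid ++ (c :: r) := by simp
    have hI : (l.length : Int) + 1 = (((l ++ [d])).length : Int) := by simp
    have hJ2 : ((l ++ c :: mid).length : Int) - 1
        = (((l ++ [d])).length : Int) + ((mid.length : Int)) - 1 := by simp; try omega
    rw [hch2, hI, hJ2, ih]
    have : pvMirrorRec (c :: r' :: rs) = d :: (pvMirrorRec mid ++ [c]) := by
      rw [pvMirrorRec]
      simp [hc, ← hdd, ← hmm, hd']
    rw [this]
    simp

-- per word: B's loop equals the bridge recursion
lemma pvWordB_eq (word : List Char) :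
    pvTwoPtr word 0 (PySem.List.len word - 1) = pvMirrorRec word := by
  have h := pvTwoPtr_seg word [] []
  simpa [PySem.List.len_eq] using h

-- ===== VERDICT (by name: the statement is the Claim_ definition above) =====
theorem mirror_word_by_word_spec : Claim_equal_mirror_word_by_word := by
  intro text _
  unfold Spec_mirror_word_by_word mirror_word_by_word mirror_word_by_word_alt
  simp only [PySem.List.slice?_none_none_neg_one, Option.getD_some,
    PySem.List.foldl_append_singleton_eq_map, List.nil_append]
  congr 1
  congr 1
  apply List.map_congr_left
  intro word _
  rw [pvWordB_eq word]
  exact pvWord_eq word
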